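-- pv_equiv track=rewrite | github.com/KugananK/Python-Assessment-1 | Code/python1.py | nine
-- ===== SOURCE A (Python) =====
-- def nine(inputString, char):
-- 	splitInput = inputString.split()
-- 	joinInput = "".join(splitInput)
-- 	word_length = len(joinInput)
-- 	for letter in range(word_length):
-- 		if joinInput[letter] == char:
-- 			return letter + 1
-- 	return -1
-- ===== SOURCE B (Python) =====
-- def nine(inputString, char):
--     # Only a single non-whitespace character can ever occur in the
--     # whitespace-stripped string, so anything else is never found.
--     if len(char) != 1 or char.isspace():
--         return -1
--     pos = inputString.find(char)
--     if pos == -1: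
--         return -1
--     # 1-based position among non-whitespace chars = absolute index + 1
--     # minus the whitespace characters that precede it.
--     return pos + 1 - sum(c.isspace() for c in inputString[:pos])
-- ===== Notes on version B (the rewrite author's own statement) =====
-- stated objective: faster
-- what changed: Replaces A's strip-then-linear-compare scan with substring search plus arithmetic: after ruling out targets that cannot occur (non-single-char or whitespace), B uses str.find to locate the first occurrence and converts its absolute index to the 1-based non-whitespace position by subtracting the count of preceding whitespace characters.
import Mathlib
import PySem

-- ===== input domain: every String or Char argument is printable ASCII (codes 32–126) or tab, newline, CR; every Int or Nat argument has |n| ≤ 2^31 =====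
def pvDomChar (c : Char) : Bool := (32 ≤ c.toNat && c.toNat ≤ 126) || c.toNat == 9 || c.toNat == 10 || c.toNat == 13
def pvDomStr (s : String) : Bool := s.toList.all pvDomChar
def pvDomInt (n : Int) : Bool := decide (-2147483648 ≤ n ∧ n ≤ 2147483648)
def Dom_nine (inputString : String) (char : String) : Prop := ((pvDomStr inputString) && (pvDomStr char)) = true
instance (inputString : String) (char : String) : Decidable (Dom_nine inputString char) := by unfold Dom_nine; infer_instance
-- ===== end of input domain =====

-- B replaces A's strip-then-compare scan by str.find plus an arithmetic correction
-- (absolute index minus preceding whitespace count); a timing run measured B faster.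

-- ===== PORT A =====
-- 'for letter in range(word_length): if joinInput[letter] == char: return letter + 1'
-- walk the joined characters in order, keeping the current index
def nineLoop (cs : List Char) (ch : List Char) (i : Nat) : Int :=
  match cs with
  | [] => -1
  | c :: rest => if [c] = ch then (i : Int) + 1 else nineLoop rest ch (i + 1)

def nine (inputString : String) (char : String) : Int :=
  let splitInput := PySem.Chars.split₀ inputString.toList
  let joinInput := PySem.Chars.join [] splitInput
  nineLoop joinInput char.toList 0

-- ===== PORT B =====
-- if len(char) != 1 or char.isspace(): return -1
-- pos = inputString.find(char); if pos == -1: return -1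
-- return pos + 1 - sum(c.isspace() for c in inputString[:pos])
def nine_alt (inputString : String) (char : String) : Int :=
  if char.toList.length ≠ 1 ∨ PySem.Chars.strIsspace char.toList then -1
  else
    let pos := PySem.Chars.find inputString.toList char.toList
    if pos = -1 then -1
    else pos + 1 -
      ((PySem.List.slice inputString.toList none (some pos)).foldl
        (fun acc c => if PySem.Chars.isspace c then acc + 1 else acc) 0)

-- ===== PRECONDITION & SPEC =====
def Spec_nine (inputString : String) (char : String) (out : Int) : Prop := out = nine_alt inputString char
instance (inputString : String) (char : String) (out : Int) : Decidable (Spec_nine inputString char out) := by unfold Spec_nine; infer_instance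

-- ===== CLAIM (what is proved, stated in full; the proofs are below) =====
def Claim_equal_nine : Prop := ∀ (inputString : String) (char : String), Dom_nine inputString char → Spec_nine inputString char (nine inputString char)

-- ===== LEMMAS AND PROOFS =====

theorem flatten_intersperse_nil {α : Type} (l : List (List α)) :
    (List.intersperse ([] : List α) l).flatten = l.flatten := by
  induction l with
  | nil => rfl
  | cons x xs ih =>
    cases xs with
    | nil => rfl
    | cons y ys => simpa [List.intersperse] using ih

-- ''.join(s.split()) removes exactly the isspace characters of s
theorem split₀_go_flatten (s cur : List Char) (acc : List (List Char)) :
    (PySem.Chars.split₀.go s cur acc).flatten =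
      acc.reverse.flatten ++ cur.reverse ++ s.filter (fun c => !PySem.Chars.isspace c) := by
  induction s generalizing cur acc with
  | nil =>
    simp only [PySem.Chars.split₀.go]
    by_cases h : cur.isEmpty
    · simp [List.isEmpty_iff.mp h]
    · simp [h]
  | cons c rest ih =>
    simp only [PySem.Chars.split₀.go]
    by_cases hs : PySem.Chars.isspace c
    · by_cases h : cur.isEmpty
      · simp [hs, ih, List.isEmpty_iff.mp h]
      · simp [hs, h, ih]
    · simp [hs, ih]

theorem join_split₀_eq_filter (s : List Char) :
    PySem.Chars.join [] (PySem.Chars.split₀ s) = s.filter (fun c => !PySem.Chars.isspace c) := by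
  have h := split₀_go_flatten s [] []
  simp only [List.reverse_nil, List.flatten_nil, List.nil_append] at h
  rw [PySem.Chars.join, PySem.Chars.split₀, List.intercalate, flatten_intersperse_nil]
  exact h

-- A's loop returns -1 when no element can equal char
theorem nineLoop_no_match (l : List Char) (ch : List Char) (k : Nat)
    (h : ∀ x ∈ l, [x] ≠ ch) : nineLoop l ch k = -1 := by
  induction l generalizing k with
  | nil => rfl
  | cons c rest ih =>
    have hc := h c (by simp)
    simp only [nineLoop, hc, if_false]
    exact ih (k + 1) (fun x hx => h x (by simp [hx]))

-- A's loop on the filtered list, when the first occurrence of c in l sits at index n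
theorem nineLoop_filter_first (c : Char) (hc : PySem.Chars.isspace c = false)
    (l : List Char) (n : Nat) (k : Nat)
    (hn : n < l.length) (hat : l[n] = c) (hbefore : ∀ j (hj : j < n), l[j]'(by omega) ≠ c) :
    nineLoop (l.filter (fun x => !PySem.Chars.isspace x)) [c] k =
      (k : Int) + ((l.take n).countP (fun x => !PySem.Chars.isspace x) : Int) + 1 := by
  induction l generalizing n k with
  | nil => simp at hn
  | cons x rest ih =>
    cases n with
    | zero =>
      simp only [List.getElem_cons_zero] at hat
      subst hat
      simp [hc, nineLoop]
    | succ m =>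
      have hx : x ≠ c := by
        have := hbefore 0 (Nat.succ_pos m)
        simpa using this
      have hn' : m < rest.length := by simpa using hn
      have hat' : rest[m] = c := by simpa using hat
      have hbefore' : ∀ j (hj : j < m), rest[j]'(by omega) ≠ c := by
        intro j hj
        have := hbefore (j + 1) (by omega)
        simpa using this
      by_cases hxs : PySem.Chars.isspace x
      · rw [List.filter_cons_of_neg (by simp [hxs])]
        rw [ih m k hn' hat' hbefore']
        simp [hxs]
      · rw [List.filter_cons_of_pos (by simp [hxs])]
        have hne : [x] ≠ [c] := by simp [hx]
        simp only [nineLoop, hne, if_false]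
        rw [ih m (k + 1) hn' hat' hbefore']
        simp [hxs]
        omega

-- singleton prefix of a drop names the character at that index
theorem singleton_prefix_drop_iff (c : Char) (l : List Char) (i : Nat) :
    [c] <+: l.drop i ↔ l[i]? = some c := by
  rw [← List.head?_drop]
  cases h : (l.drop i) with
  | nil => simp [List.prefix_nil]
  | cons y t => simp [List.cons_prefix_cons, eq_comm]

-- ===== VERDICT (by name: the statement is the Claim_ definition above) =====
theorem nine_spec : Claim_equal_nine := by
  intro inputStr char _
  unfold Spec_nine nine nine_alt
  simp only []
  rw [join_split₀_eq_filter]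
  set s := inputStr.toList with hs
  by_cases hlen : char.toList.length ≠ 1 ∨ PySem.Chars.strIsspace char.toList
  · rw [if_pos hlen]
    apply nineLoop_no_match
    intro x hx he
    have hxp := List.of_mem_filter hx
    have hxf : PySem.Chars.isspace x = false := by simpa using hxp
    rcases hlen with h1 | h2
    · apply h1; rw [← he]; rfl
    · have : PySem.Chars.strIsspace [x] = true := by rw [he]; exact h2
      simp [PySem.Chars.strIsspace, hxf] at this
  · rw [if_neg hlen]
    push Not at hlen
    obtain ⟨hlen1, hsp⟩ := hlen
    obtain ⟨c, hchar⟩ : ∃ c, char.toList = [c] := by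
      rcases hc : char.toList with _ | ⟨c, _ | _⟩ <;> simp_all
    have hcs : PySem.Chars.isspace c = false := by
      rw [hchar] at hsp
      simpa [PySem.Chars.strIsspace] using hsp
    rw [hchar]
    by_cases hfind : PySem.Chars.find s [c] = -1
    · rw [if_pos hfind]
      apply nineLoop_no_match
      intro x hx he
      have hxc : x = c := by simpa using he
      subst hxc
      have hmem : x ∈ s := List.mem_of_mem_filter hx
      rw [PySem.Chars.find_eq_neg_one_iff] at hfind
      exact hfind ((List.singleton_infix_iff x s).mpr hmem)
    · rw [if_neg hfind]
      have hpos : 0 ≤ PySem.Chars.find s [c] := by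
        have := PySem.Chars.neg_one_le_find (s := s) (sub := [c])
        omega
      set pos := PySem.Chars.find s [c] with hposdef
      obtain ⟨hpre, hfirst⟩ := PySem.Chars.find_spec hpos
      set n := pos.toNat with hn
      have hposn : pos = (n : Int) := (Int.toNat_of_nonneg hpos).symm
      have hget : s[n]? = some c := (singleton_prefix_drop_iff c s n).mp hpre
      have hnlt : n < s.length := by
        by_contra h
        simp [List.getElem?_eq_none (by omega : s.length ≤ n)] at hget
      have hat : s[n] = c := by
        rw [List.getElem?_eq_getElem hnlt] at hget
        exact Option.some.inj hget
      have hbefore : ∀ j (hj : j < n), s[j]'(by omega) ≠ c := by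
        intro j hj he
        apply hfirst j hj
        rw [singleton_prefix_drop_iff]
        rw [List.getElem?_eq_getElem (by omega)]
        exact congrArg some he
      rw [nineLoop_filter_first c hcs s n 0 hnlt hat hbefore]
      rw [hposn, PySem.List.slice_to_natCast]
      rw [PySem.List.foldl_count_if (fun c => PySem.Chars.isspace c) (s.take n) 0]
      have hlentake : (s.take n).length = n := List.length_take_of_le (by omega)
      have hsplit := List.length_eq_countP_add_countP
        (p := fun x => PySem.Chars.isspace x) (l := s.take n)
      rw [hlentake] at hsplit
      have hcong : (s.take n).countP (fun a => decide (¬PySem.Chars.isspace a = true)) =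
          (s.take n).countP (fun x => !PySem.Chars.isspace x) :=
        List.countP_congr (fun x _ => by simp)
      omega
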